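-- pv_equiv track=rewrite | github.com/Scuttie/GSDS_Qual_Exam_Programming | etc/gh/find_root_node_gpt.py | find_root_vertices
-- ===== SOURCE A (Python) =====
-- from collections import deque
--
-- def bfs(graph, start):
--     visited = set()
--     queue = deque([start])
--
--     while queue:
--         node = queue.popleft()
--         if node in visited:
--             continue
--         visited.add(node)
--         for neighbor in graph.get(node, []):
--             queue.append(neighbor)
--
--     return visited
--
-- def find_root_vertices(G):
--     all_vertices = set(G.keys())
--     root_candidates = []
--
--     for node in all_vertices:
--         reachable = bfs(G, node)
--         if reachable == all_vertices:
--             root_candidates.append(str(node))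
--
--     return root_candidates
-- ===== SOURCE B (Python) =====
-- def find_root_vertices(G):
--     vertices = set(G)
--
--     def reach(adj, s):
--         seen = {s}
--         stack = [s]
--         while stack:
--             u = stack.pop()
--             for w in adj.get(u, []):
--                 if w not in seen:
--                     seen.add(w)
--                     stack.append(w)
--         return seen
--
--     # Phase 1: DFS forest over the keys; the root of the last tree is the only
--     # possible vertex whose reachable set can equal the key set.
--     visited = set()
--     cand = None
--     for v in vertices:
--         if v not in visited:
--             visited.add(v)
--             stack = [v]
--             while stack:
--                 u = stack.pop()
--                 for w in G.get(u, []):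
--                     if w not in visited:
--                         visited.add(w)
--                         stack.append(w)
--             cand = v
--
--     if cand is None or reach(G, cand) != vertices:
--         return []
--
--     # Phase 2: exactly the vertices that reach cand reach everything.
--     rev = {}
--     for u, ns in G.items():
--         for w in ns:
--             rev.setdefault(w, []).append(u)
--     ancestors = reach(rev, cand)
--     return [str(v) for v in vertices if v in ancestors]
-- ===== Notes on version B (the rewrite author's own statement) =====
-- stated objective: faster
-- what changed: A runs a full BFS from every key and compares each reachable set with the key set; B makes a single mother-vertex pass: one DFS forest over the keys whose last tree root is the only possible root, one forward reachability check of that candidate, and one reverse-graph reachability from it that yields all roots at once.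
import Mathlib
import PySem

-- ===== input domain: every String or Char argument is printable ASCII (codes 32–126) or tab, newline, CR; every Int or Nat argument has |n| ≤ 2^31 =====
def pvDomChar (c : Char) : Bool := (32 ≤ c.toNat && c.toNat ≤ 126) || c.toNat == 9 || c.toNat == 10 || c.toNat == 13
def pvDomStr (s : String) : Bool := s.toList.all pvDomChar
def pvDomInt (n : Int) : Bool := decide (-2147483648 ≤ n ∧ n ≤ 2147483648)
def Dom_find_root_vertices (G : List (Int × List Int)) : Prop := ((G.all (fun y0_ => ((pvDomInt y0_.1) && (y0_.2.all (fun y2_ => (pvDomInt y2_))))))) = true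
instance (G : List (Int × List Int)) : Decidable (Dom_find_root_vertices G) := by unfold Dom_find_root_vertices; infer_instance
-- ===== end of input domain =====

-- B replaces A's per-key BFS + set comparison (O(V*(V+E))) by a single mother-vertex pass
-- (DFS forest → unique candidate, one forward check, one reverse-graph reachability): O(V+E),
-- measurably faster. The Pythons iterate `set(G.keys())` in CPython hash order; the result is a
-- set of root names (order irrelevant), and both ports iterate the keys in first-insertion order.

-- ===== PORT A =====

-- helper lemmas cited by the ports' termination proofs
theorem pvFilterLenLt {α : Type} (l : List α) (p q : α → Bool)
    (himp : ∀ a, p a = true → q a = true) (x : α) (hx : x ∈ l)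
    (hq : q x = true) (hp : p x = false) :
    (l.filter p).length < (l.filter q).length := by
  obtain ⟨l1, l2, rfl⟩ := List.append_of_mem hx
  have h1 := (List.monotone_filter_right l1 himp).length_le
  have h2 := (List.monotone_filter_right l2 himp).length_le
  simp only [List.filter_append, List.filter_cons, hq, hp, List.length_append,
    Bool.false_eq_true, if_false, if_pos, List.length_cons]
  omega

theorem pvGetDSubValues (g : PySem.Dict Int (List Int)) (k y : Int)
    (h : y ∈ g.getD k []) : y ∈ g.values.flatten := by
  cases hg : g.get? k with
  | none => simp [PySem.Dict.getD, hg] at h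
  | some l =>
    have hl : l ∈ g.values :=
      List.mem_map_of_mem (PySem.Dict.mem_items_of_get?_eq_some g hg)
    simp only [PySem.Dict.getD, hg, Option.getD_some] at h
    exact List.mem_flatten.mpr ⟨l, hl, h⟩

theorem pvMemOfContains {V : PySem.Set Int} {x : Int}
    (h : PySem.Set.contains V x = true) : x ∈ V := List.contains_iff_mem.mp h

theorem pvContainsOfMem {V : PySem.Set Int} {x : Int}
    (h : x ∈ V) : PySem.Set.contains V x = true := List.contains_iff_mem.mpr h

-- literal port of A's bfs helper: visited set, FIFO worklist, mark-on-pop with a skip branch;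
-- U with hU/hQ only carries the finite universe needed for termination
def pyBfsAux (g : PySem.Dict Int (List Int)) (U : List Int)
    (hU : ∀ k : Int, ∀ y ∈ g.getD k [], y ∈ U)
    (V : PySem.Set Int) (Q : List Int) (hQ : ∀ x ∈ Q, x ∈ U) : PySem.Set Int :=
  match Q with
  | [] => V
  | node :: rest =>
    if hv : PySem.Set.contains V node then
      pyBfsAux g U hU V rest (fun y hy => hQ y (List.mem_cons_of_mem _ hy))
    else
      pyBfsAux g U hU (PySem.Set.add V node) (rest ++ g.getD node [])
        (fun y hy => (List.mem_append.mp hy).elim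
          (fun h => hQ y (List.mem_cons_of_mem _ h)) (fun h => hU node y h))
  termination_by ((U.filter (fun u => ! PySem.Set.contains V u)).length, Q.length)
  decreasing_by
  · exact Prod.Lex.right _ (by simp)
  · apply Prod.Lex.left
    apply pvFilterLenLt U _ _ ?imp node (hQ node List.mem_cons_self)
      (by simp only [Bool.not_eq_true']; exact Bool.eq_false_iff.mpr hv) ?px
    case imp =>
      intro a ha
      simp only [Bool.not_eq_true'] at ha ⊢
      cases hca : PySem.Set.contains V a with
      | false => rfl
      | true =>
        have : a ∈ PySem.Set.add V node :=
          (PySem.Set.mem_add V node a).mpr (Or.inl (pvMemOfContains hca))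
        rw [pvContainsOfMem this] at ha
        exact ha
    case px =>
      have hmem : node ∈ PySem.Set.add V node :=
        (PySem.Set.mem_add V node node).mpr (Or.inr rfl)
      simp only [Bool.not_eq_false']
      exact pvContainsOfMem hmem

def pyBfs (g : PySem.Dict Int (List Int)) (start : Int) : PySem.Set Int :=
  pyBfsAux g (start :: g.values.flatten)
    (fun k y hy => List.mem_cons_of_mem _ (pvGetDSubValues g k y hy))
    PySem.Set.empty [start]
    (fun x hx => by simp only [List.mem_singleton] at hx; simp [hx])

def find_root_vertices (G : List (Int × List Int)) : List String :=
  let g := PySem.Dict.ofList G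
  let all_vertices := PySem.Set.ofList g.keys
  all_vertices.foldl
    (fun root_candidates node =>
      if PySem.Set.equal (pyBfs g node) all_vertices then
        root_candidates ++ [PySem.Int.toStr node]
      else root_candidates) []

-- ===== PORT B =====

-- the inner `for w in adj.get(u, []): if w not in seen: seen.add(w); stack.append(w)` loop of Source B
def pyDfsStep (g : PySem.Dict Int (List Int)) (ns : List Int)
    (V : PySem.Set Int) (st : List Int) : PySem.Set Int × List Int :=
  ns.foldl (fun p w =>
    if PySem.Set.contains p.1 w then p else (PySem.Set.add p.1 w, p.2 ++ [w])) (V, st)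

-- one step adds the same fresh elements to the seen set and the stack (cited by pyDfsAux)
theorem pyDfsStep_spec (g : PySem.Dict Int (List Int)) (ns : List Int) :
    ∀ V st, ∃ e, pyDfsStep g ns V st = (V ++ e, st ++ e) ∧
      (∀ w ∈ e, w ∈ ns ∧ w ∉ V) ∧ (∀ w ∈ ns, w ∈ V ++ e) := by
  induction ns with
  | nil => intro V st; exact ⟨[], by simp [pyDfsStep], by simp, by simp⟩
  | cons w ns ih =>
    intro V st
    by_cases hw : PySem.Set.contains V w = true
    · obtain ⟨e, he, h1, h2⟩ := ih V st
      refine ⟨e, by simpa [pyDfsStep, pvMemOfContains hw] using he,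
        fun w' hw' => ⟨List.mem_cons_of_mem _ (h1 w' hw').1, (h1 w' hw').2⟩, ?_⟩
      intro w' hw'
      rcases List.mem_cons.mp hw' with rfl | hmem
      · exact List.mem_append_left _ (pvMemOfContains hw)
      · exact h2 w' hmem
    · have hnv : w ∉ V := fun hc => hw (pvContainsOfMem hc)
      obtain ⟨e, he, h1, h2⟩ := ih (PySem.Set.add V w) (st ++ [w])
      have hadd : PySem.Set.add V w = V ++ [w] := by
        simp [PySem.Set.add, hnv]
      refine ⟨w :: e, ?_, ?_, ?_⟩
      · simpa [pyDfsStep, hnv, hadd, List.append_assoc] using he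
      · intro w' hw'
        rcases List.mem_cons.mp hw' with rfl | hmem
        · exact ⟨List.mem_cons_self, hnv⟩
        · obtain ⟨hn, hv⟩ := h1 w' hmem
          refine ⟨List.mem_cons_of_mem _ hn, fun hc => hv ?_⟩
          rw [hadd]
          exact List.mem_append_left _ hc
      · intro w' hw'
        rcases List.mem_cons.mp hw' with rfl | hmem
        · have hmw : w' ∈ PySem.Set.add V w' := (PySem.Set.mem_add V w' w').mpr (Or.inr rfl)
          rw [hadd] at hmw
          simpa [List.append_assoc] using List.mem_append_left e hmw
        · have := h2 w' hmem
          rw [hadd] at this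
          simpa [List.append_assoc] using this

theorem pvPopSome {st : List Int} {u : Int} {rest : List Int}
    (h : PySem.List.pop? st = some (u, rest)) : st = rest ++ [u] := by
  cases st with
  | nil => cases h
  | cons a l =>
    have hne : a :: l ≠ ([] : List Int) := by simp
    have h2 := PySem.List.pop?_last ((a :: l).dropLast) ((a :: l).getLast hne)
    rw [List.dropLast_append_getLast hne] at h2
    rw [h2] at h
    injection h with h
    injection h with h3 h4
    rw [← h3, ← h4]
    exact (List.dropLast_append_getLast hne).symm

-- literal port of Source B's `while stack:` loops: pop from the END of the stack, expand, mark on push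
def pyDfsAux (g : PySem.Dict Int (List Int)) (U : List Int)
    (hU : ∀ k : Int, ∀ y ∈ g.getD k [], y ∈ U)
    (V : PySem.Set Int) (st : List Int) (hst : ∀ x ∈ st, x ∈ U) : PySem.Set Int :=
  match hpop : PySem.List.pop? st with
  | none => V
  | some (u, rest) =>
    pyDfsAux g U hU (pyDfsStep g (g.getD u []) V rest).1 (pyDfsStep g (g.getD u []) V rest).2
      (by
        obtain ⟨e, he, h1, _⟩ := pyDfsStep_spec g (g.getD u []) V rest
        rw [he]
        intro x hx
        rcases List.mem_append.mp hx with hr | hee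
        · exact hst x (by rw [pvPopSome hpop]; exact List.mem_append_left _ hr)
        · exact hU u x (h1 x hee).1)
  termination_by ((U.filter (fun u => ! PySem.Set.contains V u)).length, st.length)
  decreasing_by
  obtain ⟨e, he, h1, _⟩ := pyDfsStep_spec g (g.getD u []) V rest
  rw [he]
  cases e with
  | nil =>
    have hstu := pvPopSome hpop
    subst hstu
    simp only [List.append_nil]
    apply Prod.Lex.right
    simp
  | cons w e' =>
    apply Prod.Lex.left
    obtain ⟨hw_ns, hw_nv⟩ := h1 w List.mem_cons_self
    apply pvFilterLenLt U _ _ ?imp w (hU u w hw_ns) ?qx ?px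
    case imp =>
      intro a ha
      simp only [Bool.not_eq_true'] at ha ⊢
      cases hca : PySem.Set.contains V a with
      | false => rfl
      | true =>
        have : a ∈ V ++ w :: e' := List.mem_append_left _ (pvMemOfContains hca)
        rw [pvContainsOfMem this] at ha
        exact ha
    case qx =>
      simp only [Bool.not_eq_true']
      cases hc : PySem.Set.contains V w with
      | false => rfl
      | true => exact absurd (pvMemOfContains hc) hw_nv
    case px =>
      have hmw : w ∈ V ++ w :: e' := List.mem_append_right _ List.mem_cons_self
      simp only [Bool.not_eq_false']
      exact pvContainsOfMem hmw

-- Source B's `reach(adj, s)`: seen = {s}, stack = [s], mark-on-push DFS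
def altReach (g : PySem.Dict Int (List Int)) (s : Int) : PySem.Set Int :=
  pyDfsAux g (s :: g.values.flatten)
    (fun k y hy => List.mem_cons_of_mem _ (pvGetDSubValues g k y hy))
    (PySem.Set.ofList [s]) [s]
    (fun x hx => by simp only [List.mem_singleton] at hx; simp [hx])

-- phase 1's inner while-loop: DFS from v into the shared, pre-seeded visited set
def altFill (g : PySem.Dict Int (List Int)) (V : PySem.Set Int) (v : Int) : PySem.Set Int :=
  pyDfsAux g (v :: g.values.flatten)
    (fun k y hy => List.mem_cons_of_mem _ (pvGetDSubValues g k y hy))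
    (PySem.Set.add V v) [v]
    (fun x hx => by simp only [List.mem_singleton] at hx; simp [hx])

-- phase 1's `for v in vertices:` loop carrying (visited, cand)
def altPhase1 (g : PySem.Dict Int (List Int)) (S : PySem.Set Int) :
    PySem.Set Int × Option Int :=
  S.foldl (fun p v =>
    if PySem.Set.contains p.1 v then p else (altFill g p.1 v, some v))
    (PySem.Set.empty, none)

-- phase 2's reverse-adjacency build: rev.setdefault(w, []).append(u) = insert w (getD w [] ++ [u])
def altRev (g : PySem.Dict Int (List Int)) : PySem.Dict Int (List Int) :=
  g.items.foldl
    (fun r p => p.2.foldl (fun r w => r.insert w (r.getD w [] ++ [p.1])) r)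
    PySem.Dict.empty

def find_root_vertices_alt (G : List (Int × List Int)) : List String :=
  let g := PySem.Dict.ofList G
  let vertices := PySem.Set.ofList g.keys
  match (altPhase1 g vertices).2 with
  | none => []
  | some cand =>
    if PySem.Set.equal (altReach g cand) vertices then
      let ancestors := altReach (altRev g) cand
      (vertices.filter (fun v => PySem.Set.contains ancestors v)).map PySem.Int.toStr
    else []

-- ===== PRECONDITION & SPEC =====
def Spec_find_root_vertices (G : List (Int × List Int)) (out : List String) : Prop := out = find_root_vertices_alt G
instance (G : List (Int × List Int)) (out : List String) : Decidable (Spec_find_root_vertices G out) := by unfold Spec_find_root_vertices; infer_instance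

-- ===== CLAIM (what is proved, stated in full; the proofs are below) =====
def Claim_equal_find_root_vertices : Prop := ∀ (G : List (Int × List Int)), Dom_find_root_vertices G → Spec_find_root_vertices G (find_root_vertices G)

-- ===== LEMMAS AND PROOFS =====

theorem pvPopNone {st : List Int} (h : PySem.List.pop? st = none) : st = [] := by
  cases st with
  | nil => rfl
  | cons a l =>
    have hne : a :: l ≠ ([] : List Int) := by simp
    have h2 := PySem.List.pop?_last ((a :: l).dropLast) ((a :: l).getLast hne)
    rw [List.dropLast_append_getLast hne] at h2
    rw [h2] at h
    cases h

-- reachability in the dict-graph: one edge, then its reflexive-transitive closure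
def pvStep (g : PySem.Dict Int (List Int)) (a b : Int) : Prop := b ∈ g.getD a []

def pvReach (g : PySem.Dict Int (List Int)) (s x : Int) : Prop :=
  Relation.ReflTransGen (pvStep g) s x

-- a predicate closed under out-edges propagates along reachability
theorem pvReachPredClosed (g : PySem.Dict Int (List Int)) (P : Int → Prop)
    (hcl : ∀ u, P u → ∀ w ∈ g.getD u [], P w) {s x : Int}
    (hs : P s) (h : pvReach g s x) : P x := by
  induction h with
  | refl => exact hs
  | tail _ hbc ih => exact hcl _ ih _ hbc

-- ---- BFS characterisation ----

theorem pyBfsAux_grows (g : PySem.Dict Int (List Int)) (U : List Int)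
    (hU : ∀ k : Int, ∀ y ∈ g.getD k [], y ∈ U)
    (V : PySem.Set Int) (Q : List Int) (hQ : ∀ x ∈ Q, x ∈ U) :
    ∀ x, (x ∈ V ∨ x ∈ Q) → x ∈ pyBfsAux g U hU V Q hQ := by
  fun_induction pyBfsAux g U hU V Q hQ with
  | case1 => intro x hx; simpa using hx
  | case2 V node rest hQ hv _ ih =>
    intro x hx
    apply ih
    rcases hx with hxv | hxq
    · exact Or.inl hxv
    · rcases List.mem_cons.mp hxq with rfl | hxr
      · exact Or.inl (pvMemOfContains hv)
      · exact Or.inr hxr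
  | case3 V node rest hQ hv _ ih =>
    intro x hx
    apply ih
    rcases hx with hxv | hxq
    · exact Or.inl ((PySem.Set.mem_add V node x).mpr (Or.inl hxv))
    · rcases List.mem_cons.mp hxq with rfl | hxr
      · exact Or.inl ((PySem.Set.mem_add V x x).mpr (Or.inr rfl))
      · exact Or.inr (List.mem_append_left _ hxr)

theorem pyBfsAux_sound (g : PySem.Dict Int (List Int)) (U : List Int)
    (hU : ∀ k : Int, ∀ y ∈ g.getD k [], y ∈ U)
    (V : PySem.Set Int) (Q : List Int) (hQ : ∀ x ∈ Q, x ∈ U) (s : Int) :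
    (∀ v ∈ V, pvReach g s v) → (∀ q ∈ Q, pvReach g s q) →
    ∀ x ∈ pyBfsAux g U hU V Q hQ, pvReach g s x := by
  fun_induction pyBfsAux g U hU V Q hQ with
  | case1 => intro hV _ x hx; exact hV x hx
  | case2 V node rest hQ hv _ ih =>
    intro hV hQr
    exact ih hV (fun q hq => hQr q (List.mem_cons_of_mem _ hq))
  | case3 V node rest hQ hv _ ih =>
    intro hV hQr
    have hnode : pvReach g s node := hQr node List.mem_cons_self
    apply ih
    · intro v hv'
      rcases (PySem.Set.mem_add V node v).mp hv' with h | h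
      · exact hV v h
      · exact h ▸ hnode
    · intro q hq
      rcases List.mem_append.mp hq with h | h
      · exact hQr q (List.mem_cons_of_mem _ h)
      · exact Relation.ReflTransGen.tail hnode h

theorem pyBfsAux_closed (g : PySem.Dict Int (List Int)) (U : List Int)
    (hU : ∀ k : Int, ∀ y ∈ g.getD k [], y ∈ U)
    (V : PySem.Set Int) (Q : List Int) (hQ : ∀ x ∈ Q, x ∈ U) :
    (∀ v ∈ V, ∀ w ∈ g.getD v [], w ∈ V ∨ w ∈ Q) →
    ∀ v ∈ pyBfsAux g U hU V Q hQ, ∀ w ∈ g.getD v [],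
      w ∈ pyBfsAux g U hU V Q hQ := by
  fun_induction pyBfsAux g U hU V Q hQ with
  | case1 =>
    intro hI v hv w hw
    rcases hI v hv w hw with h | h
    · exact h
    · cases h
  | case2 V node rest hQ hv _ ih =>
    intro hI
    apply ih
    intro v hv' w hw
    rcases hI v hv' w hw with h | h
    · exact Or.inl h
    · rcases List.mem_cons.mp h with rfl | hr
      · exact Or.inl (pvMemOfContains hv)
      · exact Or.inr hr
  | case3 V node rest hQ hv _ ih =>
    intro hI
    apply ih
    intro v hv' w hw
    rcases (PySem.Set.mem_add V node v).mp hv' with hvV | hveq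
    · rcases hI v hvV w hw with h | h
      · exact Or.inl ((PySem.Set.mem_add V node w).mpr (Or.inl h))
      · rcases List.mem_cons.mp h with rfl | hr
        · exact Or.inl ((PySem.Set.mem_add V w w).mpr (Or.inr rfl))
        · exact Or.inr (List.mem_append_left _ hr)
    · subst hveq
      exact Or.inr (List.mem_append_right _ hw)

theorem pyBfs_iff (g : PySem.Dict Int (List Int)) (s x : Int) :
    x ∈ pyBfs g s ↔ pvReach g s x := by
  constructor
  · intro hx
    refine pyBfsAux_sound g _ _ _ _ _ s ?_ ?_ x hx
    · intro v hv; cases hv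
    · intro q hq
      simp only [List.mem_singleton] at hq
      exact hq ▸ Relation.ReflTransGen.refl
  · intro h
    induction h with
    | refl =>
      exact pyBfsAux_grows g _ _ _ _ _ s (Or.inr List.mem_cons_self)
    | @tail b c hab hbc ih =>
      exact pyBfsAux_closed g _ _ _ _ _ (fun v hv => by cases hv) b ih c hbc

-- ---- DFS worklist characterisation ----

theorem pyDfsAux_grows (g : PySem.Dict Int (List Int)) (U : List Int)
    (hU : ∀ k : Int, ∀ y ∈ g.getD k [], y ∈ U)
    (V : PySem.Set Int) (st : List Int) (hst : ∀ x ∈ st, x ∈ U) :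
    ∀ x ∈ V, x ∈ pyDfsAux g U hU V st hst := by
  fun_induction pyDfsAux g U hU V st hst with
  | case1 => intro x hx; exact hx
  | case2 V st hst u rest hpop ih =>
    intro x hx
    apply ih
    obtain ⟨e, he, _, _⟩ := pyDfsStep_spec g (g.getD u []) V rest
    rw [he]
    exact List.mem_append_left _ hx

-- everything the DFS visits satisfies any out-edge-closed predicate true on seen ∪ stack
theorem pyDfsAux_soundP (g : PySem.Dict Int (List Int)) (U : List Int)
    (hU : ∀ k : Int, ∀ y ∈ g.getD k [], y ∈ U)
    (V : PySem.Set Int) (st : List Int) (hst : ∀ x ∈ st, x ∈ U) (P : Int → Prop)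
    (hPcl : ∀ u, P u → ∀ w ∈ g.getD u [], P w) :
    (∀ x ∈ V, P x) → (∀ x ∈ st, P x) →
    ∀ x ∈ pyDfsAux g U hU V st hst, P x := by
  fun_induction pyDfsAux g U hU V st hst with
  | case1 => intro hV _ x hx; exact hV x hx
  | case2 V st hst u rest hpop ih =>
    intro hV hstP
    obtain ⟨e, he, h1, _⟩ := pyDfsStep_spec g (g.getD u []) V rest
    have hu : P u :=
      hstP u (by rw [pvPopSome hpop]; exact List.mem_append_right _ List.mem_cons_self)
    apply ih
    · rw [he]
      intro x hx
      rcases List.mem_append.mp hx with h | h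
      · exact hV x h
      · exact hPcl u hu x (h1 x h).1
    · rw [he]
      intro x hx
      rcases List.mem_append.mp hx with h | h
      · exact hstP x (by rw [pvPopSome hpop]; exact List.mem_append_left _ h)
      · exact hPcl u hu x (h1 x h).1

theorem pyDfsAux_closed (g : PySem.Dict Int (List Int)) (U : List Int)
    (hU : ∀ k : Int, ∀ y ∈ g.getD k [], y ∈ U)
    (V : PySem.Set Int) (st : List Int) (hst : ∀ x ∈ st, x ∈ U) :
    (∀ x ∈ st, x ∈ V) →
    (∀ v ∈ V, v ∈ st ∨ ∀ w ∈ g.getD v [], w ∈ V) →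
    ∀ v ∈ pyDfsAux g U hU V st hst, ∀ w ∈ g.getD v [],
      w ∈ pyDfsAux g U hU V st hst := by
  fun_induction pyDfsAux g U hU V st hst with
  | case1 V st hst hpop =>
    intro _ hJ v hv w hw
    rcases hJ v hv with h | h
    · rw [pvPopNone hpop] at h; cases h
    · exact h w hw
  | case2 V st hst u rest hpop ih =>
    intro hsub hJ
    obtain ⟨e, he, h1, h2⟩ := pyDfsStep_spec g (g.getD u []) V rest
    have hstu : st = rest ++ [u] := pvPopSome hpop
    apply ih
    · rw [he]
      intro x hx
      rcases List.mem_append.mp hx with hr | hee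
      · exact List.mem_append_left _ (hsub x (by rw [hstu]; exact List.mem_append_left _ hr))
      · exact List.mem_append_right _ hee
    · rw [he]
      intro v hv
      rcases List.mem_append.mp hv with hvV | hve
      · rcases hJ v hvV with hvst | hcl
        · rw [hstu] at hvst
          rcases List.mem_append.mp hvst with hvr | hvu
          · exact Or.inl (List.mem_append_left _ hvr)
          · simp only [List.mem_singleton] at hvu
            subst hvu
            exact Or.inr (fun w hw => h2 w hw)
        · exact Or.inr (fun w hw => List.mem_append_left _ (hcl w hw))
      · exact Or.inl (List.mem_append_right _ hve)

-- ---- altReach / altFill characterisation ----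

def pvClosed (g : PySem.Dict Int (List Int)) (V : PySem.Set Int) : Prop :=
  ∀ v ∈ V, ∀ w ∈ g.getD v [], w ∈ V

theorem altReach_closed (g : PySem.Dict Int (List Int)) (s : Int) :
    pvClosed g (altReach g s) := by
  intro a ha w hw
  refine pyDfsAux_closed g _ _ _ _ _ ?_ ?_ a ha w hw
  · intro y hy
    simp only [List.mem_singleton] at hy
    exact (PySem.Set.mem_ofList [s] y).mpr (by simp [hy])
  · intro u hu
    left
    have := (PySem.Set.mem_ofList [s] u).mp hu
    simpa using this

theorem altReach_iff (g : PySem.Dict Int (List Int)) (s x : Int) :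
    x ∈ altReach g s ↔ pvReach g s x := by
  constructor
  · intro hx
    refine pyDfsAux_soundP g _ _ _ _ _ (pvReach g s)
      (fun u hu w hw => Relation.ReflTransGen.tail hu hw) ?_ ?_ x hx
    · intro y hy
      have := (PySem.Set.mem_ofList [s] y).mp hy
      simp only [List.mem_singleton] at this
      exact this ▸ Relation.ReflTransGen.refl
    · intro y hy
      simp only [List.mem_singleton] at hy
      exact hy ▸ Relation.ReflTransGen.refl
  · intro h
    have hs : s ∈ altReach g s :=
      pyDfsAux_grows g _ _ _ _ _ s ((PySem.Set.mem_ofList [s] s).mpr (by simp))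
    exact pvReachPredClosed g (fun y => y ∈ altReach g s) (altReach_closed g s) hs h

theorem altFill_closed (g : PySem.Dict Int (List Int)) (V : PySem.Set Int) (v : Int)
    (hV : pvClosed g V) : pvClosed g (altFill g V v) := by
  intro a ha w hw
  refine pyDfsAux_closed g _ _ _ _ _ ?_ ?_ a ha w hw
  · intro y hy
    simp only [List.mem_singleton] at hy
    exact (PySem.Set.mem_add V v y).mpr (Or.inr hy)
  · intro u hu
    rcases (PySem.Set.mem_add V v u).mp hu with huV | rfl
    · exact Or.inr (fun w' hw' => (PySem.Set.mem_add V v w').mpr (Or.inl (hV u huV w' hw')))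
    · exact Or.inl List.mem_cons_self

theorem altFill_mem (g : PySem.Dict Int (List Int)) (V : PySem.Set Int) (v : Int)
    (hV : pvClosed g V) (x : Int) :
    x ∈ altFill g V v ↔ x ∈ V ∨ pvReach g v x := by
  constructor
  · intro hx
    refine pyDfsAux_soundP g _ _ _ _ _ (fun y => y ∈ V ∨ pvReach g v y) ?_ ?_ ?_ x hx
    · intro u hu w hw
      rcases hu with huV | hur
      · exact Or.inl (hV u huV w hw)
      · exact Or.inr (Relation.ReflTransGen.tail hur hw)
    · intro y hy
      rcases (PySem.Set.mem_add V v y).mp hy with h | rfl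
      · exact Or.inl h
      · exact Or.inr Relation.ReflTransGen.refl
    · intro y hy
      simp only [List.mem_singleton] at hy
      exact Or.inr (hy ▸ Relation.ReflTransGen.refl)
  · intro hx
    have hvmem : v ∈ altFill g V v :=
      pyDfsAux_grows g _ _ _ _ _ v ((PySem.Set.mem_add V v v).mpr (Or.inr rfl))
    rcases hx with hxV | hr
    · exact pyDfsAux_grows g _ _ _ _ _ x ((PySem.Set.mem_add V v x).mpr (Or.inl hxV))
    · exact pvReachPredClosed g (fun y => y ∈ altFill g V v)
        (altFill_closed g V v hV) hvmem hr

-- ---- phase-1 invariant: the last DFS-forest root is the only possible mother vertex ----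

def pvCovers (g : PySem.Dict Int (List Int)) (S : List Int) (x : Int) : Prop :=
  ∀ k ∈ S, pvReach g x k

theorem phase1_aux (g : PySem.Dict Int (List Int)) (S : List Int) :
    ∀ (l : List Int) (V : PySem.Set Int) (c : Option Int),
    (∀ v ∈ l, v ∈ S) → pvClosed g V →
    (∀ c0, c = some c0 → c0 ∈ S ∧
      ∀ x ∈ V, pvCovers g S x → pvCovers g S c0) →
    pvClosed g (l.foldl (fun p v =>
        if PySem.Set.contains p.1 v then p else (altFill g p.1 v, some v)) (V, c)).1 ∧
    (∀ x ∈ V, x ∈ (l.foldl (fun p v =>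
        if PySem.Set.contains p.1 v then p else (altFill g p.1 v, some v)) (V, c)).1) ∧
    (∀ v ∈ l, v ∈ (l.foldl (fun p v =>
        if PySem.Set.contains p.1 v then p else (altFill g p.1 v, some v)) (V, c)).1) ∧
    (∀ c0, (l.foldl (fun p v =>
        if PySem.Set.contains p.1 v then p else (altFill g p.1 v, some v)) (V, c)).2 = some c0 →
      c0 ∈ S ∧ ∀ x ∈ (l.foldl (fun p v =>
        if PySem.Set.contains p.1 v then p else (altFill g p.1 v, some v)) (V, c)).1,
        pvCovers g S x → pvCovers g S c0) := by
  intro l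
  induction l with
  | nil =>
    intro V c hl hV hc
    exact ⟨hV, fun x hx => hx, by simp, hc⟩
  | cons v l ih =>
    intro V c hl hV hc
    by_cases hcv : PySem.Set.contains V v = true
    · simp only [List.foldl_cons, if_pos hcv]
      obtain ⟨i1, i2, i3, i4⟩ := ih V c (fun v' hv' => hl v' (List.mem_cons_of_mem _ hv')) hV hc
      exact ⟨i1, i2, fun v' hv' => by
        rcases List.mem_cons.mp hv' with heq | h
        · rw [heq]; exact i2 v (pvMemOfContains hcv)
        · exact i3 v' h, i4⟩
    · simp only [List.foldl_cons, if_neg hcv]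
      have hvS : v ∈ S := hl v List.mem_cons_self
      have hV' : pvClosed g (altFill g V v) := altFill_closed g V v hV
      have hc' : ∀ c0, (some v : Option Int) = some c0 → c0 ∈ S ∧
          ∀ x ∈ altFill g V v, pvCovers g S x → pvCovers g S c0 := by
        intro c0 h0
        injection h0 with h0
        subst h0
        refine ⟨hvS, ?_⟩
        intro x hx hcov
        rcases (altFill_mem g V v hV x).mp hx with hxV | hr
        · -- x was already visited; then v would be visited too, contradiction
          exfalso
          have hvV : v ∈ V :=
            pvReachPredClosed g (fun y => y ∈ V) hV hxV (hcov v hvS)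
          exact hcv (pvContainsOfMem hvV)
        · intro k hk
          exact Relation.ReflTransGen.trans hr (hcov k hk)
      obtain ⟨i1, i2, i3, i4⟩ := ih (altFill g V v) (some v)
        (fun v' hv' => hl v' (List.mem_cons_of_mem _ hv')) hV' hc'
      refine ⟨i1, ?_, ?_, i4⟩
      · intro x hx
        exact i2 x ((altFill_mem g V v hV x).mpr (Or.inl hx))
      · intro v' hv'
        rcases List.mem_cons.mp hv' with heq | h
        · rw [heq]; exact i2 v ((altFill_mem g V v hV v).mpr (Or.inr Relation.ReflTransGen.refl))
        · exact i3 v' h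
    
theorem phase1_some_stays (g : PySem.Dict Int (List Int)) :
    ∀ (l : List Int) (V : PySem.Set Int) (c0 : Int),
    ((l.foldl (fun p v =>
        if PySem.Set.contains p.1 v then p else (altFill g p.1 v, some v)) (V, some c0)).2).isSome := by
  intro l
  induction l with
  | nil => intro V c0; rfl
  | cons v l ih =>
    intro V c0
    simp only [List.foldl_cons]
    by_cases hcv : PySem.Set.contains V v = true
    · rw [if_pos hcv]; exact ih V c0
    · rw [if_neg hcv]; exact ih (altFill g V v) v

theorem phase1_none (g : PySem.Dict Int (List Int)) (S : PySem.Set Int)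
    (h : (altPhase1 g S).2 = none) : S = [] := by
  cases S with
  | nil => rfl
  | cons v vs =>
    exfalso
    have hcv : PySem.Set.contains PySem.Set.empty v = false := rfl
    unfold altPhase1 at h
    simp only [List.foldl_cons, hcv, Bool.false_eq_true, if_false] at h
    have := phase1_some_stays g vs (altFill g PySem.Set.empty v) v
    rw [h] at this
    cases this

-- ---- reverse graph: membership and reachability flip ----

theorem altRev_inner (u : Int) (ns : List Int) :
    ∀ (r : PySem.Dict Int (List Int)) (x w : Int),
    x ∈ (ns.foldl (fun r w' => r.insert w' (r.getD w' [] ++ [u])) r).getD w [] ↔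
      x ∈ r.getD w [] ∨ (x = u ∧ w ∈ ns) := by
  induction ns with
  | nil => simp
  | cons n ns ih =>
    intro r x w
    simp only [List.foldl_cons]
    rw [ih, PySem.Dict.getD_insert]
    by_cases hwn : w = n
    · rw [if_pos hwn]
      subst hwn
      simp only [List.mem_append, List.mem_cons]
      tauto
    · rw [if_neg hwn]
      simp only [List.mem_cons]
      tauto

theorem altRev_outer (L : List (Int × List Int)) :
    ∀ (r : PySem.Dict Int (List Int)) (x w : Int),
    x ∈ (L.foldl (fun r p =>
        p.2.foldl (fun r w' => r.insert w' (r.getD w' [] ++ [p.1])) r) r).getD w [] ↔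
      x ∈ r.getD w [] ∨ ∃ p ∈ L, x = p.1 ∧ w ∈ p.2 := by
  induction L with
  | nil => simp
  | cons p L ih =>
    intro r x w
    simp only [List.foldl_cons]
    rw [ih, altRev_inner]
    simp only [List.exists_mem_cons_iff]
    tauto

theorem altRev_getD_mem (g : PySem.Dict Int (List Int)) (hk : g.keys.Nodup) (x w : Int) :
    x ∈ (altRev g).getD w [] ↔ w ∈ g.getD x [] := by
  unfold altRev
  rw [altRev_outer]
  simp only [PySem.Dict.getD_empty, List.not_mem_nil, false_or]
  constructor
  · rintro ⟨p, hp, rfl, hw⟩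
    rw [PySem.Dict.getD_of_mem_items g (k := p.1) (v := p.2) hp hk]
    exact hw
  · intro hw
    cases hg : g.get? x with
    | none =>
      rw [PySem.Dict.getD_eq_get?_getD, hg] at hw
      cases hw
    | some ns =>
      refine ⟨(x, ns), PySem.Dict.mem_items_of_get?_eq_some g hg, rfl, ?_⟩
      rw [PySem.Dict.getD_eq_get?_getD, hg] at hw
      exact hw

theorem altRev_reach (g : PySem.Dict Int (List Int)) (hk : g.keys.Nodup) (a b : Int) :
    pvReach (altRev g) a b ↔ pvReach g b a := by
  constructor
  · intro h
    induction h with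
    | refl => exact Relation.ReflTransGen.refl
    | @tail m c _ hbc ih =>
      exact Relation.ReflTransGen.head
        (show pvStep g c m from (altRev_getD_mem g hk c m).mp hbc) ih
  · intro h
    induction h with
    | refl => exact Relation.ReflTransGen.refl
    | @tail m c _ hbc ih =>
      exact Relation.ReflTransGen.head
        (show pvStep (altRev g) c m from (altRev_getD_mem g hk m c).mpr hbc) ih

-- ---- Set.equal is extensional ----

theorem pvSetEqualIff (X Y : PySem.Set Int) :
    PySem.Set.equal X Y = true ↔ (∀ x : Int, x ∈ X ↔ x ∈ Y) := by
  simp only [PySem.Set.equal, Bool.and_eq_true, PySem.Set.issubset_iff]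
  constructor
  · rintro ⟨h1, h2⟩ x
    exact ⟨fun hx => h1 x hx, fun hx => h2 x hx⟩
  · intro h
    exact ⟨fun x hx => (h x).mp hx, fun x hx => (h x).mpr hx⟩

-- ---- main equality ----

theorem pvMainEq (G : List (Int × List Int)) :
    find_root_vertices G = find_root_vertices_alt G := by
  simp only [find_root_vertices, find_root_vertices_alt]
  set g := PySem.Dict.ofList G with hg
  set S := PySem.Set.ofList g.keys with hS
  have hk : g.keys.Nodup := PySem.Dict.nodup_keys_ofList G
  -- the phase-1 invariant for the full key list
  obtain ⟨hVcl, hVmono, hSV, hcinv⟩ := phase1_aux g S S PySem.Set.empty none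
    (fun v hv => hv)
    (by intro v hv w hw; exact absurd hv (List.not_mem_nil))
    (by intro c0 h0; cases h0)
  have halt : altPhase1 g S = S.foldl (fun p v =>
      if PySem.Set.contains p.1 v then p else (altFill g p.1 v, some v))
      (PySem.Set.empty, none) := rfl
  rw [← halt] at hVcl hVmono hSV hcinv
  rw [PySem.List.foldl_append_if]
  simp only [List.nil_append]
  cases hc2 : (altPhase1 g S).2 with
  | none =>
    have hnil : S = [] := phase1_none g S hc2
    rw [hnil]
    simp
  | some c =>
    show List.map PySem.Int.toStr (List.filter (fun node => PySem.Set.equal (pyBfs g node) S) S) =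
      if PySem.Set.equal (altReach g c) S = true then
        List.map PySem.Int.toStr (List.filter (fun v => PySem.Set.contains (altReach (altRev g) c) v) S)
      else []
    obtain ⟨hcS, hcbest⟩ := hcinv c hc2
    by_cases hch : PySem.Set.equal (altReach g c) S = true
    · rw [if_pos hch]
      have hcR : ∀ x : Int, pvReach g c x ↔ x ∈ S := by
        intro x
        rw [← altReach_iff]
        exact (pvSetEqualIff _ _).mp hch x
      have hSclosed : ∀ k ∈ S, ∀ w ∈ g.getD k [], w ∈ S := by
        intro k hk' w hw
        exact (hcR w).mp (Relation.ReflTransGen.tail ((hcR k).mpr hk') hw)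
      apply congrArg
      apply List.filter_congr
      intro v hv
      apply Bool.eq_iff_iff.mpr
      rw [PySem.Set.contains_iff, altReach_iff, altRev_reach g hk, pvSetEqualIff]
      constructor
      · intro hEA
        have : c ∈ pyBfs g v := ((hEA c).mpr hcS)
        exact (pyBfs_iff g v c).mp this
      · intro hvc x
        rw [pyBfs_iff]
        constructor
        · intro hr
          exact pvReachPredClosed g (fun y => y ∈ S) hSclosed hv hr
        · intro hxS
          exact Relation.ReflTransGen.trans hvc ((hcR x).mpr hxS)
    · rw [if_neg hch]
      have hnone : S.filter (fun node => PySem.Set.equal (pyBfs g node) S) = [] := by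
        rw [List.filter_eq_nil_iff]
        intro v hv hEA
        have hvR : ∀ x : Int, pvReach g v x ↔ x ∈ S := by
          intro x
          rw [← pyBfs_iff]
          exact (pvSetEqualIff _ _).mp hEA x
        have hSclosed : ∀ k ∈ S, ∀ w ∈ g.getD k [], w ∈ S := by
          intro k hk' w hw
          exact (hvR w).mp (Relation.ReflTransGen.tail ((hvR k).mpr hk') hw)
        have hcov : pvCovers g S v := fun k hk' => (hvR k).mpr hk'
        have hcovc : pvCovers g S c := hcbest v (hSV v hv) hcov
        apply hch
        rw [pvSetEqualIff]
        intro x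
        rw [altReach_iff]
        constructor
        · intro hr
          exact pvReachPredClosed g (fun y => y ∈ S) hSclosed hcS hr
        · intro hxS
          exact hcovc x hxS
      rw [hnone]
      rfl

-- ===== VERDICT (by name: the statement is the Claim_ definition above) =====
theorem find_root_vertices_spec : Claim_equal_find_root_vertices := by
  intro G _
  show find_root_vertices G = find_root_vertices_alt G
  exact pvMainEq G
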